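-- pv_equiv track=rewrite | github.com/Zanatta84/XLAG_V5 | xlag_turbo_gui_v1_9_8_fixed_burst.py | group_contiguous_ports
-- ===== SOURCE A (Python) =====
-- def group_contiguous_ports(ports):
--     """Agrupa uma lista ordenada de portas em intervalos contíguos.
--        Retorna uma lista de tuplas: (porta_unica,) ou (porta_inicio, porta_fim).
--     """
--     if not ports: return []
--     groups = []
--     start_range = ports[0]
--     end_range = ports[0]
--     for i in range(1, len(ports)):
--         if ports[i] == end_range + 1:
--             end_range = ports[i]
--         else:
--             if start_range == end_range:
--                 groups.append((start_range,))
--             else: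
--                 groups.append((start_range, end_range))
--             start_range = ports[i]
--             end_range = ports[i]
--     # Adiciona o último grupo
--     if start_range == end_range:
--         groups.append((start_range,))
--     else:
--         groups.append((start_range, end_range))
--     return groups
-- ===== SOURCE B (Python) =====
-- from itertools import groupby
--
-- def group_contiguous_ports(ports):
--     groups = []
--     for _, run in groupby(enumerate(ports), key=lambda t: t[1] - t[0]):
--         g = [p for _, p in run]
--         groups.append((g[0],) if len(g) == 1 else (g[0], g[-1]))
--     return groups
-- ===== Notes on version B (the rewrite author's own statement) =====
-- stated objective: idiomatic
-- what changed: Replaces the hand-written start/end state machine with itertools.groupby over enumerate(ports) keyed by port-index, so runs are detected by a constant key instead of mutable range tracking.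
import Mathlib
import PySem

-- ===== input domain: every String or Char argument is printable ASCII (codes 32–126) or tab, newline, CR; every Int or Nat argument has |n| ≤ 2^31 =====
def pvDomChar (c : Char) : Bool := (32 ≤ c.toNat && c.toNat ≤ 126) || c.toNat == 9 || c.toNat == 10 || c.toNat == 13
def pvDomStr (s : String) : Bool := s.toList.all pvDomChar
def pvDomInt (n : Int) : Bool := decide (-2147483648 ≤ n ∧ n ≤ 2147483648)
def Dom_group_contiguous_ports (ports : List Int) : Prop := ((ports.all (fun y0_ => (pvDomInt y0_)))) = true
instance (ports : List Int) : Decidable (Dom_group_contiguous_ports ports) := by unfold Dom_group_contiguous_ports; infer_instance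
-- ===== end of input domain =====

-- B replaces A's hand-written start/end state machine by itertools.groupby over
-- enumerate(ports) keyed by port - index (idiomatic run detection); ports agree on all inputs.


-- ===== PORT A =====
-- the for-loop of A, carrying the mutable state (groups, start_range, end_range)
def gcpLoopA (groups : List (List Int)) (s e : Int) : List Int → List (List Int)
  | [] => groups ++ [if s = e then [s] else [s, e]]
  | p :: rest =>
    if p = e + 1 then gcpLoopA groups s p rest
    else gcpLoopA (groups ++ [if s = e then [s] else [s, e]]) p p rest

def group_contiguous_ports (ports : List Int) : List (List Int) :=
  match ports with
  | [] => []
  | p0 :: rest => gcpLoopA [] p0 p0 rest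

-- ===== PORT B =====
-- port of Python's enumerate(...) starting at index i
def gcpEnumFrom (i : Int) : List Int → List (Int × Int)
  | [] => []
  | p :: rest => (i, p) :: gcpEnumFrom (i + 1) rest

-- the groupby loop: k = key (port - index) of the current group, s = g[0], l = g[-1],
-- n = len(g); a pair with a different key closes the group and starts a new one
def gcpLoopB (k s l : Int) (n : Nat) : List (Int × Int) → List (List Int)
  | [] => [if n = 1 then [s] else [s, l]]
  | (i, p) :: rest =>
    if p - i = k then gcpLoopB k s p (n + 1) rest
    else (if n = 1 then [s] else [s, l]) :: gcpLoopB (p - i) p p 1 rest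

def group_contiguous_ports_alt (ports : List Int) : List (List Int) :=
  match gcpEnumFrom 0 ports with
  | [] => []
  | (i, p) :: rest => gcpLoopB (p - i) p p 1 rest

-- ===== PRECONDITION & SPEC =====
def Spec_group_contiguous_ports (ports : List Int) (out : List (List Int)) : Prop := out = group_contiguous_ports_alt ports
instance (ports : List Int) (out : List (List Int)) : Decidable (Spec_group_contiguous_ports ports out) := by unfold Spec_group_contiguous_ports; infer_instance

-- ===== CLAIM (what is proved, stated in full; the proofs are below) =====
def Claim_equal_group_contiguous_ports : Prop := ∀ (ports : List Int), Dom_group_contiguous_ports ports → Spec_group_contiguous_ports ports (group_contiguous_ports ports)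

-- ===== LEMMAS AND PROOFS =====

-- loop invariant: B's key satisfies k = e + 1 - j (j = next index), and the current run
-- of length n stretches from s to e = s + n - 1; then the two loops produce the same groups.
theorem gcpLoop_eq (rest : List Int) : ∀ (groups : List (List Int)) (s e k j : Int) (n : Nat),
    k = e + 1 - j → 1 ≤ n → e = s + (n : Int) - 1 →
    gcpLoopA groups s e rest = groups ++ gcpLoopB k s e n (gcpEnumFrom j rest) := by
  induction rest with
  | nil =>
    intro groups s e k j n _ hn hrun
    have hiff : (n = 1) = (s = e) := by
      simp only [eq_iff_iff]; omega
    simp [gcpLoopA, gcpEnumFrom, gcpLoopB, hiff]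
  | cons p rest ih =>
    intro groups s e k j n hk hn hrun
    simp only [gcpLoopA, gcpEnumFrom, gcpLoopB]
    by_cases hp : p = e + 1
    · rw [if_pos hp, if_pos (show p - j = k by omega)]
      have := ih groups s p k (j + 1) (n + 1) (by omega) (by omega) (by push_cast; omega)
      simpa using this
    · rw [if_neg hp, if_neg (show ¬ p - j = k by omega)]
      have hgrp : (if n = 1 then [s] else [s, e]) = (if s = e then [s] else [s, e]) := by
        by_cases hse : s = e
        · rw [if_pos hse, if_pos (show n = 1 by omega)]
        · rw [if_neg hse, if_neg (show ¬ n = 1 by omega)]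
      rw [hgrp]
      have := ih (groups ++ [if s = e then [s] else [s, e]]) p p (p - j) (j + 1) 1
        (by omega) (by omega) (by push_cast; omega)
      simpa using this

-- ===== VERDICT (by name: the statement is the Claim_ definition above) =====
theorem group_contiguous_ports_spec : Claim_equal_group_contiguous_ports := by
  intro ports _
  unfold Spec_group_contiguous_ports group_contiguous_ports group_contiguous_ports_alt
  cases ports with
  | nil => simp [gcpEnumFrom]
  | cons p0 rest =>
    simp only [gcpEnumFrom]
    have := gcpLoop_eq rest [] p0 p0 (p0 - 0) 1 1 (by omega) (by omega) (by omega)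
    simpa using this
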